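-- pv_equiv track=rewrite | github.com/NawarMalhis/AFF | annotated_fasta.py | _validate_header_extra
-- ===== SOURCE A (Python) =====
-- def _validate_header_extra(he: str=None):
--     _ret = True
--     if he is None:
--         return True
--     lst = he.split('\n')
--     for line in lst:
--         if len(line) == 0:
--             return False
--         if line[0] != '#':
--             return False
--     return True
-- ===== SOURCE B (Python) =====
-- def _validate_header_extra(he: str=None):
--     # single char scan: first char must be '#', every char after a '\n' must be '#',
--     # and the string must not end in '\n'
--     if he is None:
--         return True
--     if he[:1] != '#':
--         return False
--     prev = ''
--     for c in he:
--         if prev == '\n' and c != '#':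
--             return False
--         prev = c
--     return prev != '\n'
-- ===== Notes on version B (the rewrite author's own statement) =====
-- stated objective: simpler
-- what changed: B replaces split-on-newline-then-loop-over-lines by a single direct character scan keeping only the previous character, never materialising a list of lines.
import Mathlib
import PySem

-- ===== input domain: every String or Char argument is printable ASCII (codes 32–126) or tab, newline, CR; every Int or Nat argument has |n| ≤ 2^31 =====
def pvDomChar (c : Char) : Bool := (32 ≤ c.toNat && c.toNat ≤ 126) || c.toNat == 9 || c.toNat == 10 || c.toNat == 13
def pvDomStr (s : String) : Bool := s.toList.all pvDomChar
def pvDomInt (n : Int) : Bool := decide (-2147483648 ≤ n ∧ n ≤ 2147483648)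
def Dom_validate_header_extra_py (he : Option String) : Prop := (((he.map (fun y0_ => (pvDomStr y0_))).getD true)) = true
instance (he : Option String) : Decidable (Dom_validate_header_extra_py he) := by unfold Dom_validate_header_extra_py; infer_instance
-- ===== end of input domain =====

-- B replaces split-into-lines-then-loop by one direct character scan with a previous-character
-- accumulator (objective: simpler, no list of lines is materialised; same asymptotic cost).

-- ===== PORT A =====
-- the for-loop over the list of lines (lines as List Char, proofs are done on the list side)
def pvALoop : List (List Char) → Bool
  | [] => true
  | line :: rest =>
    if PySem.Chars.len line = 0 then false
    else if PySem.Chars.pyGet? line 0 ≠ some '#' then false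
    else pvALoop rest

def validate_header_extra_py (he : Option String) : Bool :=
  match he with
  | none => true
  | some s => pvALoop (PySem.Chars.splitOn s.toList ['\n'])

-- ===== PORT B =====
-- the for-loop: prev is the previous character (none before the first iteration, Python's '')
def pvBScan : Option Char → List Char → Bool
  | prev, [] => decide (prev ≠ some '\n')
  | prev, c :: rest =>
    if prev = some '\n' ∧ c ≠ '#' then false else pvBScan (some c) rest

def validate_header_extra_py_alt (he : Option String) : Bool :=
  match he with
  | none => true
  | some s =>
    if PySem.Str.slice s none (some 1) ≠ "#" then false
    else pvBScan none s.toList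

-- ===== PRECONDITION & SPEC =====
def Spec_validate_header_extra_py (he : Option String) (out : Bool) : Prop := out = validate_header_extra_py_alt he
instance (he : Option String) (out : Bool) : Decidable (Spec_validate_header_extra_py he out) := by unfold Spec_validate_header_extra_py; infer_instance

-- ===== CLAIM (what is proved, stated in full; the proofs are below) =====
def Claim_equal_validate_header_extra_py : Prop := ∀ (he : Option String), Dom_validate_header_extra_py he → Spec_validate_header_extra_py he (validate_header_extra_py he)

-- ===== LEMMAS AND PROOFS =====

-- simple accumulator-free recursion computing splitOn cs ['\n'] (proof-side reference)
def pvSplitNL : List Char → List (List Char)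
  | [] => [[]]
  | c :: rest =>
    if c = '\n' then [] :: pvSplitNL rest
    else match pvSplitNL rest with
      | [] => [[c]]          -- unreachable: pvSplitNL is never []
      | p :: ps => (c :: p) :: ps

lemma pvSplitNL_ne_nil (cs : List Char) : pvSplitNL cs ≠ [] := by
  cases cs with
  | nil => simp [pvSplitNL]
  | cons c rest =>
    simp only [pvSplitNL]
    split
    · simp
    · split <;> simp

lemma pvSplitOn_go_eq (fuel : Nat) :
    ∀ (l cur : List Char) (acc : List (List Char)), l.length < fuel →
      PySem.Chars.splitOn.go ['\n'] fuel l cur acc =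
        acc.reverse ++
          (match pvSplitNL l with
           | [] => [cur.reverse]
           | p :: ps => (cur.reverse ++ p) :: ps) := by
  induction fuel with
  | zero => intro l cur acc h; omega
  | succ fuel ih =>
    intro l cur acc h
    cases l with
    | nil => simp [PySem.Chars.splitOn.go, pvSplitNL]
    | cons c rest =>
      by_cases hc : c = '\n'
      · subst hc
        have hstep : PySem.Chars.splitOn.go ['\n'] (fuel + 1) ('\n' :: rest) cur acc =
            PySem.Chars.splitOn.go ['\n'] fuel rest [] (cur.reverse :: acc) := by
          simp [PySem.Chars.splitOn.go, List.isPrefixOf]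
        rw [hstep, ih rest [] (cur.reverse :: acc) (by simpa using Nat.lt_of_succ_lt_succ h)]
        simp only [pvSplitNL, List.reverse_cons, List.reverse_nil, List.nil_append]
        cases hps : pvSplitNL rest with
        | nil => exact absurd hps (pvSplitNL_ne_nil rest)
        | cons p ps => simp
      · have hstep : PySem.Chars.splitOn.go ['\n'] (fuel + 1) (c :: rest) cur acc =
            PySem.Chars.splitOn.go ['\n'] fuel rest (c :: cur) acc := by
          simp [PySem.Chars.splitOn.go, List.isPrefixOf]
          exact fun h => absurd h.symm hc
        rw [hstep, ih rest (c :: cur) acc (by simpa using Nat.lt_of_succ_lt_succ h)]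
        simp only [pvSplitNL, if_neg hc]
        cases hps : pvSplitNL rest with
        | nil => exact absurd hps (pvSplitNL_ne_nil rest)
        | cons p ps => simp

lemma pvSplitOn_eq (cs : List Char) : PySem.Chars.splitOn cs ['\n'] = pvSplitNL cs := by
  show PySem.Chars.splitOn.go ['\n'] (cs.length + 1) cs [] [] = pvSplitNL cs
  rw [pvSplitOn_go_eq (cs.length + 1) cs [] [] (by omega)]
  cases hps : pvSplitNL cs with
  | nil => exact absurd hps (pvSplitNL_ne_nil cs)
  | cons p ps => simp

lemma pvPyGet0 (c : Char) (p : List Char) : PySem.List.pyGet? (c :: p) 0 = some c := by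
  simp [PySem.List.pyGet?, PySem.List.pyIdx?]

lemma pvALoop_cons (c : Char) (p : List Char) (ps : List (List Char)) :
    pvALoop ((c :: p) :: ps) = if c = '#' then pvALoop ps else false := by
  simp only [pvALoop, PySem.Chars.len_eq, PySem.Chars.pyGet?_eq_listPyGet?, pvPyGet0]
  have h0 : ¬ ((p.length : Int) + 1 = 0) := by omega
  by_cases hc : c = '#' <;> simp [hc, h0]

lemma pvJoint (cs : List Char) :
    (∀ c, c ≠ '\n' → pvBScan (some c) cs = pvALoop (pvSplitNL cs).tail) ∧
    pvBScan (some '\n') cs = pvALoop (pvSplitNL cs) := by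
  induction cs with
  | nil => simp [pvBScan, pvSplitNL, pvALoop, PySem.Chars.len]
  | cons c rest ih =>
    obtain ⟨ih1, ih2⟩ := ih
    constructor
    · intro d hd
      have hL : pvBScan (some d) (c :: rest) = pvBScan (some c) rest := by
        simp [pvBScan, hd]
      rw [hL]
      by_cases hc : c = '\n'
      · subst hc
        simpa [pvSplitNL] using ih2
      · rw [ih1 c hc]
        simp only [pvSplitNL, if_neg hc]
        cases hps : pvSplitNL rest with
        | nil => exact absurd hps (pvSplitNL_ne_nil rest)
        | cons p ps => simp
    · by_cases hc : c = '#'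
      · subst hc
        have hL : pvBScan (some '\n') ('#' :: rest) = pvBScan (some '#') rest := by
          simp [pvBScan]
        rw [hL, ih1 '#' (by decide)]
        simp only [pvSplitNL, if_neg (by decide : ¬ ('#' = '\n'))]
        cases hps : pvSplitNL rest with
        | nil => exact absurd hps (pvSplitNL_ne_nil rest)
        | cons p ps => simp [pvALoop_cons]
      · have hL : pvBScan (some '\n') (c :: rest) = false := by
          simp [pvBScan, hc]
        rw [hL]
        by_cases hn : c = '\n'
        · subst hn
          simp [pvSplitNL, pvALoop, PySem.Chars.len]
        · simp only [pvSplitNL, if_neg hn]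
          cases hps : pvSplitNL rest with
          | nil => exact absurd hps (pvSplitNL_ne_nil rest)
          | cons p ps => simp [pvALoop_cons, hc]

lemma pvSliceOne (s : String) :
    (PySem.Str.slice s none (some 1) = "#") ↔ s.toList.take 1 = ['#'] := by
  rw [← String.toList_inj, PySem.Str.toList_slice, PySem.Chars.slice_eq_listSlice,
    PySem.List.slice_to s.toList (by norm_num : (0:Int) ≤ 1),
    show "#".toList = ['#'] from by decide]
  norm_num

-- ===== VERDICT (by name: the statement is the Claim_ definition above) =====
theorem validate_header_extra_py_spec : Claim_equal_validate_header_extra_py := by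
  intro he _
  unfold Spec_validate_header_extra_py validate_header_extra_py validate_header_extra_py_alt
  cases he with
  | none => rfl
  | some s =>
    simp only [pvSplitOn_eq]
    by_cases hs : PySem.Str.slice s none (some 1) = "#"
    · have htake := (pvSliceOne s).mp hs
      cases hcs : s.toList with
      | nil => simp [hcs] at htake
      | cons c cs =>
        rw [hcs] at htake
        simp only [List.take_succ_cons, List.take_zero, List.cons.injEq, and_true] at htake
        subst htake
        rw [if_neg (by simp [hs])]
        have h2 := (pvJoint ('#' :: cs)).2
        have hL : pvBScan (some '\n') ('#' :: cs) = pvBScan (some '#') cs := by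
          simp [pvBScan]
        have hB : pvBScan none ('#' :: cs) = pvBScan (some '#') cs := by
          simp [pvBScan]
        rw [hB, ← hL, h2]
    · rw [if_pos (by simp [hs])]
      have htake : s.toList.take 1 ≠ ['#'] := fun h => hs ((pvSliceOne s).mpr h)
      cases hcs : s.toList with
      | nil => simp [pvSplitNL, pvALoop, PySem.Chars.len]
      | cons c cs =>
        rw [hcs] at htake
        simp only [List.take_succ_cons, List.take_zero, ne_eq, List.cons.injEq, and_true] at htake
        by_cases hn : c = '\n'
        · subst hn
          simp [pvSplitNL, pvALoop, PySem.Chars.len]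
        · simp only [pvSplitNL, if_neg hn]
          cases hps : pvSplitNL cs with
          | nil => exact absurd hps (pvSplitNL_ne_nil cs)
          | cons p ps => simp [pvALoop_cons, htake]
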